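-- pv_equiv track=rewrite | github.com/Liefellin/Python_practice | Files/Find_a_word.py | contains_scrambled_word
-- ===== SOURCE A (Python) =====
-- def compile_text(text):
--     letters = {}
--     for character in text.lower():
--         if character.isalpha():
--             if character in letters:
--                 letters[character] += 1
--             else:
--                 letters[character] = 1
--     return letters
--
-- def contains_scrambled_word(word, scramble):
--     word = compile_text(word)
--     scramble = compile_text(scramble)
--     for character in word:
--         if character in scramble:
--             if scramble[character] >= word[character]:
--                 pass
--             else:
--                 return False
--         else:
--             return False
--     return True
-- ===== SOURCE B (Python) =====
-- def contains_scrambled_word(word, scramble):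
--     need = sorted(c for c in word.lower() if c.isalpha())
--     have = sorted(c for c in scramble.lower() if c.isalpha())
--     i = 0
--     for c in have:
--         if i < len(need) and need[i] == c:
--             i += 1
--     return i == len(need)
-- ===== Notes on version B (the rewrite author's own statement) =====
-- stated objective: alternative
-- what changed: Replaces A's letter-frequency dicts and per-letter count comparison by a sort-and-merge algorithm: B sorts the lowered alpha-filtered letters of both strings and runs one greedy merge scan checking the word's sorted letters are a subsequence of the scramble's.
import Mathlib
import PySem

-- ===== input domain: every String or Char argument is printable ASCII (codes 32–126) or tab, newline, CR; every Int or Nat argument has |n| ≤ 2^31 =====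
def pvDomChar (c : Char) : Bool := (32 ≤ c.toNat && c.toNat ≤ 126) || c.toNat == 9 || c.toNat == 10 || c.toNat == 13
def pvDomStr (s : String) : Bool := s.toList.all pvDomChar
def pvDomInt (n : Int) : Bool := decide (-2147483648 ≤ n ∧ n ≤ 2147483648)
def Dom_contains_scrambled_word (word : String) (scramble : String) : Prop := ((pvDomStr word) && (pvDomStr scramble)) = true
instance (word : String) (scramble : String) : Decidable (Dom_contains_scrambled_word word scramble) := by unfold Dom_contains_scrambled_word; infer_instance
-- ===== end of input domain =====

-- B replaces A's letter-frequency dicts by sorting both (lowered, alpha-filtered) letter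
-- lists and running one greedy merge scan that checks the word's letters embed in the
-- scramble's (objective: alternative algorithm, similar cost).

-- ===== PORT A =====
-- compile_text: build a dict counting the alphabetic characters of text.lower()
def compileText (text : String) : PySem.Dict Char Int :=
  (PySem.Str.lower text).toList.foldl
    (fun letters character =>
      if PySem.Chars.isalpha character then
        if letters.contains character then
          letters.modify character 0 (· + 1)      -- letters[character] += 1
        else
          letters.insert character 1              -- letters[character] = 1
      else letters)
    PySem.Dict.empty

-- 'for character in word: …' over the dict's keys; the indexings scramble[character] /
-- word[character] are ported with getD, exact here because membership is checked first
-- (for scramble) and character ranges over word's own keys (for word).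
def contains_scrambled_word (word : String) (scramble : String) : Bool :=
  let w := compileText word
  let s := compileText scramble
  w.keys.all (fun character =>
    if s.contains character then decide (w.getD character 0 ≤ s.getD character 0)
    else false)

-- ===== PORT B =====
-- Python's guarded 'i < len(need) and need[i] == c' is exactly 'need[i]? = some c'.
def contains_scrambled_word_alt (word : String) (scramble : String) : Bool :=
  let need := PySem.List.sorted ((PySem.Str.lower word).toList.filter PySem.Chars.isalpha) (fun c => c) false
  let hv := PySem.List.sorted ((PySem.Str.lower scramble).toList.filter PySem.Chars.isalpha) (fun c => c) false
  let i := hv.foldl (fun i c => if need[i]? = some c then i + 1 else i) 0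
  decide (i = need.length)

-- ===== PRECONDITION & SPEC =====
def Spec_contains_scrambled_word (word : String) (scramble : String) (out : Bool) : Prop := out = contains_scrambled_word_alt word scramble
instance (word : String) (scramble : String) (out : Bool) : Decidable (Spec_contains_scrambled_word word scramble out) := by unfold Spec_contains_scrambled_word; infer_instance

-- ===== CLAIM (what is proved, stated in full; the proofs are below) =====
def Claim_equal_contains_scrambled_word : Prop := ∀ (word : String) (scramble : String), Dom_contains_scrambled_word word scramble → Spec_contains_scrambled_word word scramble (contains_scrambled_word word scramble)

-- ===== LEMMAS AND PROOFS =====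

-- A's fold step is exactly Counter's step (when the key is absent, modify inserts dflt+1 = 1)
theorem compileText_step_eq (d : PySem.Dict Char Int) (c : Char) :
    (if d.contains c then d.modify c 0 (· + 1) else d.insert c 1) = d.modify c 0 (· + 1) := by
  by_cases h : d.contains c = true
  · simp [h]
  · simp only [Bool.not_eq_true] at h
    simp [h, PySem.Dict.modify, PySem.Dict.getD_of_not_contains _ _ h]

theorem compileText_eq (text : String) :
    compileText text =
      PySem.Dict.counter ((PySem.Str.lower text).toList.filter PySem.Chars.isalpha) := by
  rw [PySem.Dict.counter_eq_foldl, List.foldl_filter]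
  unfold compileText
  congr 1
  funext d c
  by_cases h : PySem.Chars.isalpha c = true
  · simp [h, compileText_step_eq]
  · simp [h]

-- A is the count-inclusion test on the filtered lists
theorem portA_iff_counts (word scramble : String) :
    contains_scrambled_word word scramble = true ↔
      ∀ c ∈ (PySem.Str.lower word).toList.filter PySem.Chars.isalpha,
        ((PySem.Str.lower word).toList.filter PySem.Chars.isalpha).count c ≤
        ((PySem.Str.lower scramble).toList.filter PySem.Chars.isalpha).count c := by
  unfold contains_scrambled_word
  simp only [compileText_eq, PySem.Dict.keys_counter]
  set wl := (PySem.Str.lower word).toList.filter PySem.Chars.isalpha with hwl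
  set sl := (PySem.Str.lower scramble).toList.filter PySem.Chars.isalpha with hsl
  simp only [List.all_eq_true, PySem.Set.mem_ofList,
    PySem.Dict.contains_counter, PySem.Dict.getD_counter, List.contains_eq_mem]
  constructor
  · intro h c hc
    have hthis := h c hc
    by_cases hm : c ∈ sl
    · simp only [hm, decide_true, if_true, decide_eq_true_eq] at hthis
      exact_mod_cast hthis
    · simp [hm] at hthis
  · intro h c hc
    have hcount := h c hc
    have hpos : 0 < wl.count c := List.count_pos_iff.mpr hc
    have hm : c ∈ sl := List.count_pos_iff.mp (lt_of_lt_of_le hpos hcount)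
    simp only [hm, decide_true, if_true, decide_eq_true_eq]
    exact_mod_cast hcount

-- B's greedy merge scan decides the sublist relation on the sorted lists
theorem greedy_iff_sublist (need : List Char) :
    ∀ (hv : List Char) (i : Nat), i ≤ need.length →
      ((hv.foldl (fun i c => if need[i]? = some c then i + 1 else i) i = need.length) ↔
        List.Sublist (need.drop i) hv) := by
  intro hv
  induction hv with
  | nil =>
    intro i hi
    simp only [List.foldl_nil, List.sublist_nil, List.drop_eq_nil_iff]
    omega
  | cons c rest ih =>
    intro i hi
    simp only [List.foldl_cons]
    by_cases hg : need[i]? = some c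
    · have hlt : i < need.length := by
        by_contra h
        rw [List.getElem?_eq_none (by omega)] at hg
        exact absurd hg (by simp)
      rw [if_pos hg, ih (i + 1) (by omega)]
      have hdrop : need.drop i = c :: need.drop (i + 1) := by
        rw [← List.getElem_cons_drop hlt]
        congr 1
        have := List.getElem?_eq_getElem hlt
        rw [this] at hg
        exact Option.some.inj hg
      rw [hdrop, List.cons_sublist_cons]
    · rw [if_neg hg, ih i hi]
      constructor
      · exact fun h => h.trans (List.sublist_cons_self c rest)
      · intro h
        rcases hdi : need.drop i with _ | ⟨d, t⟩
        · simp
        · rw [hdi] at h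
          have hd : need[i]? = some d := by
            have hlt : i < need.length := by
              by_contra hge
              rw [List.drop_eq_nil_iff.mpr (by omega)] at hdi
              exact absurd hdi (by simp)
            rw [List.getElem?_eq_getElem hlt]
            have := List.getElem_cons_drop hlt
            rw [hdi] at this
            exact congrArg some (List.head_eq_of_cons_eq this.symm).symm
          have hne : d ≠ c := fun he => hg (he ▸ hd)
          cases h with
          | cons _ h' => exact h'
          | cons₂ => exact absurd rfl hne

theorem portB_iff_sublist (word scramble : String) :
    contains_scrambled_word_alt word scramble = true ↔
      List.Sublist (PySem.List.sorted ((PySem.Str.lower word).toList.filter PySem.Chars.isalpha) (fun c => c) false)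
      (PySem.List.sorted ((PySem.Str.lower scramble).toList.filter PySem.Chars.isalpha) (fun c => c) false) := by
  unfold contains_scrambled_word_alt
  simp only [decide_eq_true_eq]
  rw [greedy_iff_sublist _ _ 0 (Nat.zero_le _), List.drop_zero]

theorem ports_agree (word scramble : String) :
    contains_scrambled_word word scramble = contains_scrambled_word_alt word scramble := by
  set wl := (PySem.Str.lower word).toList.filter PySem.Chars.isalpha with hwl
  set sl := (PySem.Str.lower scramble).toList.filter PySem.Chars.isalpha with hsl
  rw [Bool.eq_iff_iff, portA_iff_counts, portB_iff_sublist, ← hwl, ← hsl]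
  rw [← List.subperm_ext_iff]
  constructor
  · intro h
    apply List.sublist_of_subperm_of_pairwise (r := fun a b : Char => a ≤ b)
    · exact ((PySem.List.sorted_perm wl (fun c => c) false).subperm).trans
        (h.trans (PySem.List.sorted_perm sl (fun c => c) false).symm.subperm)
    · exact PySem.List.sorted_pairwise wl (fun c => c)
    · exact PySem.List.sorted_pairwise sl (fun c => c)
  · intro h
    exact ((PySem.List.sorted_perm wl (fun c => c) false).symm.subperm).trans
      (h.subperm.trans (PySem.List.sorted_perm sl (fun c => c) false).subperm)

-- ===== VERDICT (by name: the statement is the Claim_ definition above) =====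
theorem contains_scrambled_word_spec : Claim_equal_contains_scrambled_word := by
  intro word scramble _
  unfold Spec_contains_scrambled_word
  exact ports_agree word scramble
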